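-- pv_equiv track=rewrite | github.com/AlexBadProgrammer/PYTHON100 | Slayd8.py | begotnya2
-- ===== SOURCE A (Python) =====
-- def begotnya2(km):
--     lst = []
--     days = 0
--     n = 100
--     itog = 0
--     for i in range(2, n + 1):
--         for j in range(2, i):
--             if i % j == 0:
--                 break
--         else:
--             lst.append(i)
--     while itog < km:
--         itog += lst[days]
--         days += 1
--     return days, itog
-- ===== SOURCE B (Python) =====
-- def begotnya2(km):
--     n = 100
--     is_prime = [False, False] + [True] * (n - 1)
--     for i in range(2, n + 1):
--         if is_prime[i]:
--             for j in range(i * i, n + 1, i):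
--                 is_prime[j] = False
--     prefix = [0]
--     for i, p in enumerate(is_prime):
--         if p:
--             prefix.append(prefix[-1] + i)
--     return next((d, s) for d, s in enumerate(prefix) if s >= km)
-- ===== Notes on version B (the rewrite author's own statement) =====
-- stated objective: alternative
-- what changed: Primes 2..100 come from a Sieve of Eratosthenes instead of trial division, and the running-total while-loop is replaced by building a prefix-sum list once and returning the first (index, sum) pair whose sum reaches km.
import Mathlib
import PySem

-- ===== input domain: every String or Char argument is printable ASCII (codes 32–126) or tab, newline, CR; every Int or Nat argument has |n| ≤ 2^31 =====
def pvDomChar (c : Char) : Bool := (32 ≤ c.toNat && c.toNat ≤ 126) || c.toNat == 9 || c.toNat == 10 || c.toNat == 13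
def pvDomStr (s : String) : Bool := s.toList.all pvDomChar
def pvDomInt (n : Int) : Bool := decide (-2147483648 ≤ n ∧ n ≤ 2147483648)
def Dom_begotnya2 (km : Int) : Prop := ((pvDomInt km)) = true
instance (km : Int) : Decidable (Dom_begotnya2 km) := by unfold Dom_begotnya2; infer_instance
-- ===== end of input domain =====

-- B sieves the primes and searches a prefix-sum list for the first sum reaching km, instead of A's trial division plus running-total while-loop; return value only.


-- ===== PORT A =====
-- lst: for i in range(2, 101): for j in range(2, i): if i % j == 0: break / else: lst.append(i)
-- (the for-else is ported as "no j in range(2, i) divides i")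
def pvLstA : List Int :=
  (PySem.List.pyRange 2 (100 + 1) 1).foldl
    (fun acc i =>
      if (PySem.List.pyRange 2 i 1).all (fun j => !(PySem.Int.mod i j == 0)) then acc ++ [i]
      else acc) []

-- while itog < km: itog += lst[days]; days += 1  — consumes lst front-to-back tracking days;
-- on an exhausted list Python raises IndexError (excluded by Pre_), here the loop stops.
def pvLoopA (km : Int) : List Int → Int → Int → Int × Int
  | [], days, itog => (days, itog)
  | p :: rest, days, itog =>
    if itog < km then pvLoopA km rest (days + 1) (itog + p) else (days, itog)

def begotnya2 (km : Int) : Int × Int := pvLoopA km pvLstA 0 0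

-- ===== PORT B =====
-- is_prime = [False, False] + [True]*(n-1); cross off multiples of each surviving i from i*i
def pvSieve : List Bool :=
  (PySem.List.pyRange 2 (100 + 1) 1).foldl
    (fun ip i =>
      if ip.getD i.toNat false then
        (PySem.List.pyRange (i * i) (100 + 1) i).foldl (fun ip2 j => ip2.set j.toNat false) ip
      else ip)
    ([false, false] ++ List.replicate (100 - 1) true)

-- prefix = [0]; for i, p in enumerate(is_prime): if p: prefix.append(prefix[-1] + i)
def pvPrefix : List Int :=
  pvSieve.zipIdx.foldl
    (fun pre x => if x.1 then pre ++ [(pre.getLast?.getD 0) + (x.2 : Int)] else pre) [0]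

-- next((d, s) for d, s in enumerate(prefix) if s >= km); StopIteration (outside Pre_) ported as (0, 0)
def pvNext (km : Int) : List Int → Int → Int × Int
  | [], _ => (0, 0)
  | s :: rest, d => if km ≤ s then (d, s) else pvNext km rest (d + 1)

def begotnya2_alt (km : Int) : Int × Int := pvNext km pvPrefix 0

-- ===== PRECONDITION & SPEC =====
-- Pre_ excludes km > 1060 (the sum of the 25 primes below 100): there Python A raises IndexError.
def Pre_begotnya2 (km : Int) : Prop := km ≤ 1060
instance (km : Int) : Decidable (Pre_begotnya2 km) := by unfold Pre_begotnya2; infer_instance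
def pvWitness_begotnya2 : Int := (100)

def Spec_begotnya2 (km : Int) (out : Int × Int) : Prop := out = begotnya2_alt km
instance (km : Int) (out : Int × Int) : Decidable (Spec_begotnya2 km out) := by unfold Spec_begotnya2; infer_instance

-- ===== CLAIM =====
def Claim_equal_begotnya2 : Prop := ∀ (km : Int), Dom_begotnya2 km → Pre_begotnya2 km → Spec_begotnya2 km (begotnya2 km)

-- ===== LEMMAS AND PROOFS =====
-- the prefix-sum list of lst starting from itog (proof-side characterisation of pvPrefix)
def pvPrefixFrom (itog : Int) : List Int → List Int
  | [] => [itog]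
  | p :: rest => itog :: pvPrefixFrom (itog + p) rest

set_option maxRecDepth 4000 in
theorem pvPrefix_eq : pvPrefix = pvPrefixFrom 0 pvLstA := by decide

set_option maxRecDepth 4000 in
theorem pvLstA_sum : pvLstA.sum = 1060 := by decide

theorem pvLoop_eq_next (km : Int) (lst : List Int) (days itog : Int)
    (h : km ≤ itog + lst.sum) :
    pvLoopA km lst days itog = pvNext km (pvPrefixFrom itog lst) days := by
  induction lst generalizing days itog with
  | nil =>
    simp only [List.sum_nil, add_zero] at h
    simp only [pvLoopA, pvPrefixFrom, pvNext, if_pos h]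
  | cons p rest ih =>
    simp only [List.sum_cons] at h
    simp only [pvLoopA, pvPrefixFrom, pvNext]
    by_cases hc : itog < km
    · rw [if_pos hc, if_neg (by omega)]
      exact ih _ _ (by omega)
    · rw [if_neg hc, if_pos (by omega)]

-- ===== VERDICT =====
theorem begotnya2_spec : Claim_equal_begotnya2 := by
  intro km _ hpre
  show pvLoopA km pvLstA 0 0 = pvNext km pvPrefix 0
  rw [pvPrefix_eq]
  exact pvLoop_eq_next km pvLstA 0 0 (by rw [pvLstA_sum]; simpa using hpre)
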